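-- pv_equiv track=rewrite | github.com/sushilrajeeva/CrackingCodingPrep | CH_27_STRING_MANIPULATION/prob.py | isRev
-- ===== SOURCE A (Python) =====
-- def isLower(a: str) -> bool:
--     return ord('a') <= ord(a) <= ord('z')
--
-- def isUpper(a: str) -> bool:
--     return ord('A') <= ord(a) <= ord('Z')
--
-- def getLower(a: str) -> str:
--     diff: int = ord(a) - ord('A')
--     return chr(ord('a') + diff)
--
-- def isRev(s: str) -> bool:
--     left: int = 0
--     n: int = len(s)
--     right: int = n - 1
--
--     while left < n and right >= 0:
--         if not isLower(s[left]):
--             left += 1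
--         elif not isUpper(s[right]):
--             right -= 1
--         else:
--             if s[left] != getLower(s[right]): return False
--             left += 1
--             right -= 1
--
--     return True
-- ===== SOURCE B (Python) =====
-- def isLower(a: str) -> bool:
--     return ord('a') <= ord(a) <= ord('z')
--
-- def isUpper(a: str) -> bool:
--     return ord('A') <= ord(a) <= ord('Z')
--
-- def getLower(a: str) -> str:
--     diff: int = ord(a) - ord('A')
--     return chr(ord('a') + diff)
--
-- def isRev(s: str) -> bool:
--     lowers = [c for c in s if isLower(c)]
--     uppers = [c for c in s if isUpper(c)]
--     for lo, up in zip(lowers, reversed(uppers)):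
--         if lo != getLower(up):
--             return False
--     return True
-- ===== Notes on version B (the rewrite author's own statement) =====
-- stated objective: simpler
-- what changed: Replaces the interleaved two-pointer while loop over indices with two filtering passes (lowercase letters forward, uppercase letters backward via reversed) and a single zip comparison over the min-length pairing.
import Mathlib
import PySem

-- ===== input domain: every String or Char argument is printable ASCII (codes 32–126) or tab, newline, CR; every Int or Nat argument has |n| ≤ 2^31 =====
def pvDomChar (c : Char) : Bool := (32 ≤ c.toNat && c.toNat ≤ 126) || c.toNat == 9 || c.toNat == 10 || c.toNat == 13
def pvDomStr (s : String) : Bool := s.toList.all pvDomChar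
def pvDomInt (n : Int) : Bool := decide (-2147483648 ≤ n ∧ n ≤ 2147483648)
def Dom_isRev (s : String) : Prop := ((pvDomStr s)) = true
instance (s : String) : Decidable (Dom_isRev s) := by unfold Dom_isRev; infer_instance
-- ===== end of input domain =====

-- B replaces A's interleaved two-pointer scan by two filtering passes plus one zip
-- comparison over the min-length pairing (objective: simpler decomposition).

-- ===== PORT A =====
-- shared helpers, transliterating isLower / isUpper / getLower from the module
def isLowerC (c : Char) : Bool := decide ('a'.toNat ≤ c.toNat ∧ c.toNat ≤ 'z'.toNat)

def isUpperC (c : Char) : Bool := decide ('A'.toNat ≤ c.toNat ∧ c.toNat ≤ 'Z'.toNat)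

def getLowerC (c : Char) : Char :=
  let diff : Int := (c.toNat : Int) - ('A'.toNat : Int)
  Char.ofNat ((('a'.toNat : Int) + diff).toNat)

-- the while loop of A; indices are always in range when read (left starts at 0,
-- the guard gives left < n and right ≥ 0), so getD's default is never used
def isRevLoop (cs : List Char) (n left right : Int) : Bool :=
  if h : left < n ∧ right ≥ 0 then
    if ¬ isLowerC (cs.getD left.toNat ' ') then
      isRevLoop cs n (left + 1) right
    else if ¬ isUpperC (cs.getD right.toNat ' ') then
      isRevLoop cs n left (right - 1)
    else if cs.getD left.toNat ' ' ≠ getLowerC (cs.getD right.toNat ' ') then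
      false
    else
      isRevLoop cs n (left + 1) (right - 1)
  else
    true
termination_by ((n - left) + (right + 1)).toNat
decreasing_by all_goals omega

def isRev (s : String) : Bool :=
  let cs := s.toList
  let n : Int := cs.length
  isRevLoop cs n 0 (n - 1)

-- ===== PORT B =====
-- the zip-and-compare loop of B ('for lo, up in zip(lowers, reversed(uppers))')
def zipCheck : List Char → List Char → Bool
  | l :: ls, u :: us => if l ≠ getLowerC u then false else zipCheck ls us
  | _, _ => true

def isRev_alt (s : String) : Bool :=
  let lowers := s.toList.filter isLowerC
  let uppers := s.toList.filter isUpperC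
  zipCheck lowers uppers.reverse

-- ===== PRECONDITION & SPEC =====
def Spec_isRev (s : String) (out : Bool) : Prop := out = isRev_alt s
instance (s : String) (out : Bool) : Decidable (Spec_isRev s out) := by unfold Spec_isRev; infer_instance

-- ===== CLAIM (what is proved, stated in full; the proofs are below) =====
def Claim_equal_isRev : Prop := ∀ (s : String), Dom_isRev s → Spec_isRev s (isRev s)

-- ===== LEMMAS AND PROOFS =====

lemma zipCheck_nil_right (ls : List Char) : zipCheck ls [] = true := by
  cases ls <;> rfl

-- invariant: at state (left, right) the loop decides zipCheck of the lowercase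
-- letters not yet passed by `left` against the reversed uppercase letters not yet
-- passed by `right`
lemma isRevLoop_eq (cs : List Char) (l r : Nat) (hr : r ≤ cs.length) :
    isRevLoop cs cs.length (l : Int) ((r : Int) - 1)
      = zipCheck ((cs.drop l).filter isLowerC) (((cs.take r).filter isUpperC).reverse) := by
  induction hn : (cs.length - l) + r using Nat.strong_induction_on generalizing l r with
  | _ m ih =>
  subst hn
  by_cases hl : l < cs.length
  · by_cases hrpos : 0 < r
    · rw [isRevLoop]
      rw [dif_pos (show (l : Int) < (cs.length : Int) ∧ ((r : Int) - 1) ≥ 0 by constructor <;> omega)]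
      have hlt : (((l : Int)).toNat) = l := by omega
      have hrt : ((((r : Int) - 1)).toNat) = r - 1 := by omega
      rw [hlt, hrt]
      have hr1 : r - 1 < cs.length := by omega
      have hgl : cs.getD l ' ' = cs[l] := by
        simp [List.getD_eq_getElem?_getD, hl]
      have hgr : cs.getD (r - 1) ' ' = cs[r - 1] := by
        simp [List.getD_eq_getElem?_getD, hr1]
      have hdrop : cs.drop l = cs[l] :: cs.drop (l + 1) :=
        List.drop_eq_getElem_cons hl
      have htake : cs.take r = cs.take (r - 1) ++ [cs[r - 1]] := by
        conv_lhs => rw [show r = (r - 1) + 1 by omega]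
        rw [List.take_add_one, List.getElem?_eq_getElem hr1]
        rfl
      have hca : ((l : Int) + 1) = ((l + 1 : Nat) : Int) := by push_cast; ring
      have hcb : ((r : Int) - 1 - 1) = (((r - 1 : Nat)) : Int) - 1 := by omega
      have hRdrop : (cs.drop l).filter isLowerC
          = if isLowerC cs[l] then cs[l] :: (cs.drop (l + 1)).filter isLowerC
            else (cs.drop (l + 1)).filter isLowerC := by
        rw [hdrop, List.filter_cons]
      have hRtake : ((cs.take r).filter isUpperC).reverse
          = if isUpperC cs[r - 1] then cs[r - 1] :: ((cs.take (r - 1)).filter isUpperC).reverse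
            else ((cs.take (r - 1)).filter isUpperC).reverse := by
        rw [htake, List.filter_append]
        by_cases hU : isUpperC cs[r - 1] <;> simp [hU]
      rw [hgl, hgr]
      by_cases hlow : isLowerC cs[l]
      · by_cases hupp : isUpperC cs[r - 1]
        · rw [if_neg (by simp [hlow]), if_neg (by simp [hupp])]
          rw [hRdrop, hRtake, if_pos hlow, if_pos hupp]
          by_cases heq : cs[l] = getLowerC cs[r - 1]
          · rw [if_neg (by simp [heq])]
            rw [hca, hcb, ih ((cs.length - (l + 1)) + (r - 1)) (by omega) (l + 1) (r - 1) (by omega) rfl]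
            rw [zipCheck, if_neg (by simp [heq])]
          · rw [if_pos (by simp [heq])]
            rw [zipCheck, if_pos (by simp [heq])]
        · rw [if_neg (by simp [hlow]), if_pos (by simp [hupp])]
          rw [hcb, ih ((cs.length - l) + (r - 1)) (by omega) l (r - 1) (by omega) rfl]
          rw [hRtake, if_neg hupp]
      · rw [if_pos (by simp [hlow])]
        rw [hca, ih ((cs.length - (l + 1)) + r) (by omega) (l + 1) r hr rfl]
        rw [hRdrop, if_neg hlow]
    · have hr0 : r = 0 := by omega
      subst hr0
      rw [isRevLoop, dif_neg (by omega)]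
      simp [zipCheck_nil_right]
  · rw [isRevLoop, dif_neg (by omega)]
    rw [List.drop_eq_nil_of_le (by omega)]
    simp [zipCheck]

-- ===== VERDICT (by name: the statement is the Claim_ definition above) =====
theorem isRev_spec : Claim_equal_isRev := by
  intro s _
  unfold Spec_isRev isRev isRev_alt
  have h := isRevLoop_eq s.toList 0 s.toList.length (le_refl _)
  rw [List.take_length] at h
  simpa using h
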